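-- pv_equiv track=rewrite | github.com/private-repos-test/mainframe | src/mainframe/clients/ctp.py | extract_terminals
-- ===== SOURCE A (Python) =====
-- class FetchTransitLinesException(Exception):
--     pass
--
-- def extract_terminals(route, separators):
--     if not separators:
--         cj = "Cluj-Napoca"
--         if cj in route:
--             return cj, route.replace(cj, "").split("-")[1]
--         raise FetchTransitLinesException(
--             f"Couldn't extract terminals from route: {route}"
--         )
--     separator = separators.pop()
--     if route.count(separator) > 1:
--         return route.split(separator)[:2]
--
--     try:
--         terminal1, terminal2 = route.split(separator)
--     except ValueError:
--         return extract_terminals(route, separators)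
--
--     return terminal1, terminal2
-- ===== SOURCE B (Python) =====
-- class FetchTransitLinesException(Exception):
--     pass
--
-- def extract_terminals(route, separators):
--     # Single backwards scan instead of pop()+recursion+try/except unpacking.
--     # NOTE: unlike A, this does NOT mutate `separators`; return values agree.
--     for sep in reversed(separators):
--         if not sep:
--             continue
--         parts = route.split(sep)
--         if len(parts) >= 2:
--             return parts[:2] if len(parts) > 2 else (parts[0], parts[1])
--     cj = "Cluj-Napoca"
--     if cj in route:
--         return cj, route.replace(cj, "").split("-")[1]
--     raise FetchTransitLinesException(
--         f"Couldn't extract terminals from route: {route}"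
--     )
-- ===== Notes on version B (the rewrite author's own statement) =====
-- stated objective: simpler
-- what changed: A's pop()-and-recurse loop with try/except tuple unpacking is replaced by a single backwards for-loop over the separators with an explicit length test on the split result; B performs one split per separator and does not mutate the separators list (A pops from it) - the equivalence is about the return value.
import Mathlib
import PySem

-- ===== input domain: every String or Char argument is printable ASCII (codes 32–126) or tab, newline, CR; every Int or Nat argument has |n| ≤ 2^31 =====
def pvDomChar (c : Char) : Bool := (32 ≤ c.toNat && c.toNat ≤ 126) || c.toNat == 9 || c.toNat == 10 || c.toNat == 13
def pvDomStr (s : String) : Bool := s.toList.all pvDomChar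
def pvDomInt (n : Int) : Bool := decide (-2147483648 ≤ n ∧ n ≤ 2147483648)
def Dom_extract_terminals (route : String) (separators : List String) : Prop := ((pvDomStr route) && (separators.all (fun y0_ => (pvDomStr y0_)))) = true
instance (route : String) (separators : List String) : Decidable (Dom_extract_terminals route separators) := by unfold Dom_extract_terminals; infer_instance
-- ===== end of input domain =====

-- B replaces A's pop()+recursion+try/except by one backwards scan with a length test; equivalence is about the RETURN value only
-- (A pops from `separators` in place, B does not mutate it).

-- ===== PORT A =====
-- A's `separators.pop()` reads the last element and leaves `dropLast`; the recursive call receives that shortened list.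
def extract_terminals (route : String) (separators : List String) : String × String :=
  if h : separators = [] then
    let cj := "Cluj-Napoca"
    if PySem.Str.isIn cj route then
      -- `route.replace(cj, "").split("-")[1]`; `[1]` raises IndexError when absent — Pre_ excludes that
      match PySem.Str.split? (PySem.Str.replace route cj "") "-" with
      | some (_ :: t2 :: _) => (cj, t2)
      | _ => ("", "")        -- Python raises IndexError here; excluded by Pre_
    else ("", "")            -- Python raises FetchTransitLinesException here; excluded by Pre_
  else
    let separator := separators.getLast h
    if PySem.Str.count route separator > 1 then
      match PySem.Str.split? route separator with
      | some (a :: b :: _) => (a, b)       -- route.split(separator)[:2]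
      | _ => ("", "")        -- only for separator = "": Python raises ValueError (uncaught); excluded by Pre_
    else
      match PySem.Str.split? route separator with
      | some [t1, t2] => (t1, t2)          -- terminal1, terminal2 = route.split(separator)
      | _ => extract_terminals route separators.dropLast   -- ValueError caught → recurse
termination_by separators.length
decreasing_by
  have := List.length_pos_iff.mpr h
  simp [List.length_dropLast]; omega

-- ===== PORT B =====
-- B's `for sep in reversed(separators)` loop, as structural recursion over the reversed list.
def pvAltScan (route : String) (rseps : List String) : String × String :=
  match rseps with
  | [] =>
    let cj := "Cluj-Napoca"
    if PySem.Str.isIn cj route then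
      -- `route.replace(cj, "").split("-")[1]`: `[1]` via pyGet? (none = IndexError, excluded by Pre_)
      let parts := (PySem.Str.split? (PySem.Str.replace route cj "") "-").getD []
      match PySem.List.pyGet? parts 1 with
      | some t2 => (cj, t2)
      | none => ("", "")     -- Python raises IndexError here; excluded by Pre_
    else ("", "")            -- Python raises FetchTransitLinesException here; excluded by Pre_
  | sep :: rest =>
    if sep = "" then pvAltScan route rest    -- `if not sep: continue`
    else
      let parts := (PySem.Str.split? route sep).getD []    -- sep ≠ "": split? is `some`
      if 2 ≤ parts.length then
        -- `parts[:2]` (len > 2) and `(parts[0], parts[1])` (len = 2) both carry the first two pieces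
        (PySem.List.pyGetD parts 0 "", PySem.List.pyGetD parts 1 "")
      else pvAltScan route rest

def extract_terminals_alt (route : String) (separators : List String) : String × String :=
  pvAltScan route separators.reverse

-- ===== PRECONDITION & SPEC =====
-- Scanning from the end, a separator "hits" when it occurs in the route (an empty separator "hits" any nonempty route).
def pvHit (route : String) (sep : String) : Bool :=
  if sep = "" then route != "" else decide (1 ≤ PySem.Str.count route sep)

-- Pre_ holds exactly where Python A returns: the first hit (from the end) must be a nonempty separator
-- (an empty-separator hit raises ValueError), and if no separator hits, the Cluj-Napoca fallback must
-- apply with a "-" left after the replacement (else FetchTransitLinesException / IndexError).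
def Pre_extract_terminals (route : String) (separators : List String) : Prop :=
  (match separators.reverse.find? (pvHit route) with
   | some sep => sep != ""
   | none => PySem.Str.isIn "Cluj-Napoca" route &&
       decide (2 ≤ ((PySem.Str.split? (PySem.Str.replace route "Cluj-Napoca" "") "-").getD []).length)) = true

instance (route : String) (separators : List String) : Decidable (Pre_extract_terminals route separators) := by
  unfold Pre_extract_terminals; infer_instance

def pvWitness_extract_terminals : String × List String := ("Alpha - Beta", [" - "])

def Spec_extract_terminals (route : String) (separators : List String) (out : String × String) : Prop := out = extract_terminals_alt route separators
instance (route : String) (separators : List String) (out : String × String) : Decidable (Spec_extract_terminals route separators out) := by unfold Spec_extract_terminals; infer_instance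

-- ===== CLAIM (what is proved, stated in full; the proofs are below) =====
def Claim_equal_extract_terminals : Prop := ∀ (route : String) (separators : List String), Dom_extract_terminals route separators → Pre_extract_terminals route separators → Spec_extract_terminals route separators (extract_terminals route separators)

-- ===== LEMMAS AND PROOFS =====

-- one unfolding step of count.go on a nonempty list
lemma pv_count_go_step (sub : List Char) (f : Nat) (c : Char) (t : List Char) (n : Nat) :
    PySem.Chars.count.go sub (f + 1) (c :: t) n =
      (if sub.isPrefixOf (c :: t) = true then
        PySem.Chars.count.go sub f (List.drop sub.length (c :: t)) (n + 1)
      else PySem.Chars.count.go sub f t n) := by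
  rw [PySem.Chars.count.go.eq_def]

-- count.go only adds to its accumulator
lemma pv_count_go_acc (sub : List Char) :
    ∀ (f : Nat) (l : List Char) (n : Nat),
      PySem.Chars.count.go sub f l n = n + PySem.Chars.count.go sub f l 0 := by
  intro f
  induction f with
  | zero => intro l n; simp [PySem.Chars.count.go]
  | succ f ih =>
    intro l n
    cases l with
    | nil => simp [PySem.Chars.count.go]
    | cons c t =>
      rw [pv_count_go_step, pv_count_go_step]
      by_cases hp : sub.isPrefixOf (c :: t) = true
      · simp only [hp, if_true]
        rw [ih _ (n + 1), ih _ 1]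
        omega
      · simp only [hp]
        exact ih _ n

-- splitOn.go produces one piece more than count.go finds occurrences (enough fuel on both sides)
lemma pv_split_go_len (sub : List Char) (hsub : sub ≠ []) :
    ∀ (f1 : Nat) (l cur : List Char) (acc : List (List Char)) (f2 : Nat),
      l.length ≤ f1 → l.length ≤ f2 →
      (PySem.Chars.splitOn.go sub f1 l cur acc).length
        = acc.length + 1 + PySem.Chars.count.go sub f2 l 0 := by
  intro f1
  induction f1 with
  | zero =>
    intro l cur acc f2 h1 h2
    have hl : l = [] := by cases l with | nil => rfl | cons a t => simp at h1
    subst hl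
    cases f2 <;> simp [PySem.Chars.splitOn.go, PySem.Chars.count.go]
  | succ f ih =>
    intro l cur acc f2 h1 h2
    cases l with
    | nil => cases f2 <;> simp [PySem.Chars.splitOn.go, PySem.Chars.count.go]
    | cons c t =>
      have hf2 : ∃ g, f2 = g + 1 := by
        cases f2 with
        | zero => simp at h2
        | succ g => exact ⟨g, rfl⟩
      obtain ⟨g, rfl⟩ := hf2
      simp only [List.length_cons] at h1 h2
      rw [PySem.Chars.splitOn.go.eq_def, pv_count_go_step]
      by_cases hp : sub.isPrefixOf (c :: t) = true
      · simp only [hp, if_true]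
        have hsl : 1 ≤ sub.length := by
          cases sub with | nil => exact absurd rfl hsub | cons a b => simp
        have hd1 : (List.drop sub.length (c :: t)).length ≤ f := by
          rw [List.length_drop]; simp only [List.length_cons]; omega
        have hd2 : (List.drop sub.length (c :: t)).length ≤ g := by
          rw [List.length_drop]; simp only [List.length_cons]; omega
        rw [ih _ [] _ g hd1 hd2, pv_count_go_acc sub g _ 1]
        simp; omega
      · simp only [hp]
        have ht1 : t.length ≤ f := by omega
        have ht2 : t.length ≤ g := by omega
        exact ih _ (c :: cur) _ g ht1 ht2

-- the number of pieces Python's split returns is count + 1 (nonempty separator)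
lemma pv_splitOn_length (s sub : List Char) (hsub : sub ≠ []) :
    (PySem.Chars.splitOn s sub).length = PySem.Chars.count s sub + 1 := by
  have hemp : sub.isEmpty = false := by cases sub with | nil => exact absurd rfl hsub | cons a b => rfl
  rw [PySem.Chars.splitOn, PySem.Chars.count, hemp]
  simp only [Bool.false_eq_true, if_false]
  rw [pv_split_go_len sub hsub (s.length + 1) s [] [] s.length (by omega) (le_refl _)]
  simp; omega

lemma pv_split?_some (route sep : String) (hsep : sep ≠ "") :
    PySem.Str.split? route sep
      = some ((PySem.Chars.splitOn route.toList sep.toList).map String.ofList)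
    ∧ (PySem.Chars.splitOn route.toList sep.toList).length = PySem.Str.count route sep + 1 := by
  have htl : sep.toList ≠ [] := by
    intro h
    exact hsep (by simpa [String.toList_eq_nil_iff] using h)
  constructor
  · rw [PySem.Str.split?, PySem.Chars.split?]
    have : sep.toList.isEmpty = false := by
      cases htoList : sep.toList with
      | nil => exact absurd htoList htl
      | cons a b => rfl
    simp [this]
  · exact pv_splitOn_length _ _ htl

-- the empty separator: split? is none, count is |route| + 1
lemma pv_split?_empty (route : String) : PySem.Str.split? route "" = none := by
  simp [PySem.Str.split?, PySem.Chars.split?]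

lemma pv_count_empty (route : String) : PySem.Str.count route "" = route.toList.length + 1 := by
  simp [PySem.Str.count, PySem.Chars.count]

-- main induction, over the reversed separator list (B's traversal order)
lemma pv_main (route : String) :
    ∀ (rseps : List String),
      (match rseps.find? (pvHit route) with
       | some sep => sep != ""
       | none => PySem.Str.isIn "Cluj-Napoca" route &&
           decide (2 ≤ ((PySem.Str.split? (PySem.Str.replace route "Cluj-Napoca" "") "-").getD []).length)) = true →
      extract_terminals route rseps.reverse = pvAltScan route rseps := by
  intro rseps
  induction rseps with
  | nil =>
    -- the two fallbacks compute the same value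
    intro _
    rw [List.reverse_nil, extract_terminals, pvAltScan, dif_pos rfl]
    by_cases hcj : PySem.Str.isIn "Cluj-Napoca" route
    · simp only [hcj, if_true]
      obtain ⟨hsome, _⟩ := pv_split?_some (PySem.Str.replace route "Cluj-Napoca" "") "-" (by decide)
      rw [hsome]
      simp only [Option.getD_some]
      rcases PySem.Chars.splitOn (PySem.Str.replace route "Cluj-Napoca" "").toList "-".toList
          with _ | ⟨p0, _ | ⟨p1, t⟩⟩ <;>
        simp [PySem.List.pyGet?, PySem.List.pyIdx?]
    · simp only [hcj, Bool.false_eq_true, if_false]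
  | cons sep rest ih =>
    intro hpre
    have hne : (rest.reverse ++ [sep]) ≠ [] := by simp
    have hlast : (rest.reverse ++ [sep]).getLast hne = sep := List.getLast_append_singleton _
    have hdrop : (rest.reverse ++ [sep]).dropLast = rest.reverse := List.dropLast_concat ..
    rw [List.reverse_cons, extract_terminals, dif_neg hne]
    simp only [hlast, hdrop]
    rw [pvAltScan]
    by_cases hsep : sep = ""
    · subst hsep
      by_cases hroute : route = ""
      · subst hroute
        have hhit : pvHit "" "" = false := by simp [pvHit]
        rw [List.find?_cons_of_neg (by simp [hhit])] at hpre
        have hc : PySem.Str.count "" "" = 1 := by rw [pv_count_empty]; rfl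
        rw [hc]
        simp only [pv_split?_empty]
        exact ih hpre
      · -- Pre_ is violated: the empty separator hits a nonempty route
        have hhit : pvHit route "" = true := by simp [pvHit, hroute]
        rw [List.find?_cons_of_pos hhit] at hpre
        simp at hpre
    · simp only [if_neg hsep]
      obtain ⟨hsome, hlen⟩ := pv_split?_some route sep hsep
      rw [hsome]
      simp only [Option.getD_some]
      by_cases hmem : 1 ≤ PySem.Str.count route sep
      · -- this separator hits: both sides return the first two pieces
        rcases hcp : PySem.Chars.splitOn route.toList sep.toList with _ | ⟨p0, t1⟩
        · rw [hcp] at hlen; simp at hlen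
        · rcases t1 with _ | ⟨p1, t⟩
          · rw [hcp] at hlen; simp only [List.length_cons, List.length_nil] at hlen; omega
          · rw [hcp] at hlen
            simp only [List.length_cons] at hlen
            simp only [List.map_cons, List.length_cons, List.length_map]
            by_cases hgt : PySem.Str.count route sep > 1
            · rw [if_pos hgt, if_pos (by omega)]
              simp [PySem.List.pyGetD_ofNat']
            · rw [if_neg hgt, if_pos (by omega)]
              have ht : t = [] := List.eq_nil_of_length_eq_zero (by omega)
              subst ht
              simp [PySem.List.pyGetD_ofNat']
      · -- no occurrence: count = 0, a single piece; both sides move on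
        have hc0 : PySem.Str.count route sep = 0 := by omega
        have hhit : pvHit route sep = false := by simp [pvHit, hsep]; exact hc0
        rw [List.find?_cons_of_neg (by simp [hhit])] at hpre
        rcases hcp : PySem.Chars.splitOn route.toList sep.toList with _ | ⟨p0, t1⟩
        · rw [hcp] at hlen; simp at hlen
        · rcases t1 with _ | ⟨p1, t⟩
          · simp only [List.map_cons, List.map_nil, List.length_cons, List.length_nil]
            rw [if_neg (by omega), if_neg (by omega)]
            exact ih hpre
          · rw [hcp] at hlen; simp only [List.length_cons] at hlen; omega

-- ===== VERDICT (by name: the statement is the Claim_ definition above) =====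
theorem extract_terminals_spec : Claim_equal_extract_terminals := by
  intro route separators _hdom hpre
  unfold Spec_extract_terminals extract_terminals_alt
  have h := pv_main route separators.reverse
  rw [List.reverse_reverse] at h
  exact h (by unfold Pre_extract_terminals at hpre; exact hpre)
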